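-- pv_equiv track=rewrite | github.com/RBKunnela/ALMA-memory | benchmarks/task_dependency/dag_generator.py | get_expected_ready_tasks
-- ===== SOURCE A (Python) =====
-- from typing import Dict, List, Set, Tuple
--
-- def get_expected_ready_tasks(
--     task_ids: List[str],
--     edges: List[Tuple[str, str]],
--     completed: Set[str],
-- ) -> Set[str]:
--     """Given completed tasks, return the set of tasks that should be unblocked.
--
--     A task is ready when:
--     1. It has not been completed yet.
--     2. All of its dependencies (predecessors in the edge list) have been completed.
--
--     Tasks with no dependencies are immediately ready (if not completed).
--
--     Args:
--         task_ids: All task IDs in the DAG.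
--         edges: Dependency edges as ``(from_id, to_id)`` pairs.
--         completed: Set of task IDs that have been completed.
--
--     Returns:
--         Set of task IDs that are ready to execute.
--
--     Example:
--         >>> ids, edges = generate_dag("diamond", 4)
--         >>> get_expected_ready_tasks(ids, edges, set())
--         {'t0'}
--         >>> get_expected_ready_tasks(ids, edges, {'t0'})
--         {'t1', 't2'}
--         >>> get_expected_ready_tasks(ids, edges, {'t0', 't1', 't2'})
--         {'t3'}
--     """
--     # Build dependency map: task -> set of tasks it depends on
--     deps: Dict[str, Set[str]] = {tid: set() for tid in task_ids}
--     for from_id, to_id in edges: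
--         if to_id in deps:
--             deps[to_id].add(from_id)
--
--     ready: Set[str] = set()
--     for tid in task_ids:
--         if tid in completed:
--             continue
--         # Ready if all dependencies are completed
--         if deps[tid].issubset(completed):
--             ready.add(tid)
--
--     return ready
-- ===== SOURCE B (Python) =====
-- from typing import List, Set, Tuple
--
-- def get_expected_ready_tasks(
--     task_ids: List[str],
--     edges: List[Tuple[str, str]],
--     completed: Set[str],
-- ) -> Set[str]:
--     # One pass over the edges: a task is blocked iff some predecessor is not completed.
--     blocked: Set[str] = set()
--     for from_id, to_id in edges:
--         if from_id not in completed: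
--             blocked.add(to_id)
--     return {tid for tid in task_ids if tid not in completed and tid not in blocked}
-- ===== Notes on version B (the rewrite author's own statement) =====
-- stated objective: simpler
-- what changed: Instead of building a per-task dependency-set map and testing each task's set for inclusion in completed, B makes one pass over the edges collecting a single flat 'blocked' set (targets of edges whose source is not completed) and returns the tasks that are neither completed nor blocked.
import Mathlib
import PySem

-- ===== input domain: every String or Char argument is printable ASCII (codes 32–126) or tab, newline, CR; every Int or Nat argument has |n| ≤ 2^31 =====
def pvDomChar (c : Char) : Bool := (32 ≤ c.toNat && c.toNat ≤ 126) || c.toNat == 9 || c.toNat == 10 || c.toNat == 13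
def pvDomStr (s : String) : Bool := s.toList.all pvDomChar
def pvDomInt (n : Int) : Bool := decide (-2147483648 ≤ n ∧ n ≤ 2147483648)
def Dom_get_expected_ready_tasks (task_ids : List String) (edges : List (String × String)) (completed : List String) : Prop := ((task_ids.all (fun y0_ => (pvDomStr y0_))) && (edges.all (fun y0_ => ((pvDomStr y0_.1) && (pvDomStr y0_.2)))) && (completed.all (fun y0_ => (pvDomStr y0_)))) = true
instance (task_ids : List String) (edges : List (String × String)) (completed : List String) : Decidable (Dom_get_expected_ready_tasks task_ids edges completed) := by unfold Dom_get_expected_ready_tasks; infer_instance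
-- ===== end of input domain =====

-- B replaces A's per-task dependency-set map with a single flat 'blocked' set built in one edge pass (simpler decomposition, same O(V+E) cost); equal output proved on all inputs.

-- ===== PORT A =====
-- Port of A: build deps (task -> set of predecessors) as a dict, then collect ready tasks.
def get_expected_ready_tasks (task_ids : List String) (edges : List (String × String)) (completed : List String) : List String :=
  let deps0 : PySem.Dict String (PySem.Set String) :=
    task_ids.foldl (fun d tid => d.insert tid PySem.Set.empty) PySem.Dict.empty
  let deps : PySem.Dict String (PySem.Set String) :=
    edges.foldl (fun d e =>
      if d.contains e.2 then d.modify e.2 PySem.Set.empty (fun s => PySem.Set.add s e.1) else d) deps0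
  task_ids.foldl (fun r tid =>
    if completed.contains tid then r
    else if PySem.Set.issubset (deps.getD tid PySem.Set.empty) completed then PySem.Set.add r tid
    else r) PySem.Set.empty

-- ===== PORT B =====
-- Port of B: one pass over edges builds a flat 'blocked' set; result = tasks neither completed nor blocked.
def get_expected_ready_tasks_alt (task_ids : List String) (edges : List (String × String)) (completed : List String) : List String :=
  let blocked : PySem.Set String :=
    edges.foldl (fun b e => if completed.contains e.1 then b else PySem.Set.add b e.2) PySem.Set.empty
  task_ids.foldl (fun r tid =>
    if !(completed.contains tid) && !(PySem.Set.contains blocked tid) then PySem.Set.add r tid else r)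
    PySem.Set.empty

-- ===== PRECONDITION & SPEC =====

def Spec_get_expected_ready_tasks (task_ids : List String) (edges : List (String × String)) (completed : List String) (out : List String) : Prop := out = get_expected_ready_tasks_alt task_ids edges completed
instance (task_ids : List String) (edges : List (String × String)) (completed : List String) (out : List String) : Decidable (Spec_get_expected_ready_tasks task_ids edges completed out) := by unfold Spec_get_expected_ready_tasks; infer_instance

-- ===== CLAIM (what is proved, stated in full; the proofs are below) =====
def Claim_equal_get_expected_ready_tasks : Prop := ∀ (task_ids : List String) (edges : List (String × String)) (completed : List String), Dom_get_expected_ready_tasks task_ids edges completed → Spec_get_expected_ready_tasks task_ids edges completed (get_expected_ready_tasks task_ids edges completed)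

-- ===== LEMMAS AND PROOFS =====
def depsStep (d : PySem.Dict String (PySem.Set String)) (e : String × String) : PySem.Dict String (PySem.Set String) :=
  if d.contains e.2 then d.modify e.2 PySem.Set.empty (fun s => PySem.Set.add s e.1) else d

lemma depsFold_contains (es : List (String × String)) (d : PySem.Dict String (PySem.Set String)) (k : String) :
    (List.foldl depsStep d es).contains k = d.contains k := by
  induction es generalizing d with
  | nil => rfl
  | cons e es ih =>
    simp only [List.foldl_cons, ih, depsStep]
    split_ifs with h
    · rw [PySem.Dict.contains_modify]
      by_cases hk : k = e.2 <;> simp [hk, h]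
    · rfl

lemma depsFold_mem (es : List (String × String)) (d : PySem.Dict String (PySem.Set String))
    (tid x : String) (hd : d.contains tid = true) :
    x ∈ (List.foldl depsStep d es).getD tid PySem.Set.empty ↔
      x ∈ d.getD tid PySem.Set.empty ∨ (x, tid) ∈ es := by
  induction es generalizing d with
  | nil => simp
  | cons e es ih =>
    simp only [List.foldl_cons, depsStep]
    split_ifs with h
    · rw [ih _ (by rw [PySem.Dict.contains_modify]; simp [hd]), PySem.Dict.getD_modify]
      by_cases hk : tid = e.2
      · subst hk
        rw [if_pos rfl]
        simp only [PySem.Set.mem_add, List.mem_cons, Prod.ext_iff]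
        tauto
      · rw [if_neg hk]
        simp only [List.mem_cons, Prod.ext_iff]
        tauto
    · rw [ih _ hd]
      have hne : tid ≠ e.2 := by rintro rfl; rw [hd] at h; exact h rfl
      simp only [List.mem_cons, Prod.ext_iff]
      tauto

def blockedStep (completed : List String) (b : PySem.Set String) (e : String × String) : PySem.Set String :=
  if completed.contains e.1 then b else PySem.Set.add b e.2

lemma blockedFold_mem (es : List (String × String)) (completed : List String) (b : PySem.Set String) (t : String) :
    t ∈ List.foldl (blockedStep completed) b es ↔
      t ∈ b ∨ ∃ e ∈ es, e.1 ∉ completed ∧ e.2 = t := by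
  induction es generalizing b with
  | nil => simp
  | cons e es ih =>
    simp only [List.foldl_cons, blockedStep]
    split_ifs with h
    · rw [ih]
      simp only [List.mem_cons]
      constructor
      · rintro (hx | ⟨f, hf, hf1, hf2⟩)
        · exact Or.inl hx
        · exact Or.inr ⟨f, Or.inr hf, hf1, hf2⟩
      · rintro (hx | ⟨f, hf | hf, hf1, hf2⟩)
        · exact Or.inl hx
        · subst hf; exact absurd (List.contains_iff_mem.mp h) hf1
        · exact Or.inr ⟨f, hf, hf1, hf2⟩
    · rw [ih]
      have h' : e.1 ∉ completed := fun hm => h (List.contains_iff_mem.mpr hm)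
      simp only [PySem.Set.mem_add, List.mem_cons]
      constructor
      · rintro ((hx | hx) | ⟨f, hf, hf1, hf2⟩)
        · exact Or.inl hx
        · exact Or.inr ⟨e, Or.inl rfl, h', hx.symm⟩
        · exact Or.inr ⟨f, Or.inr hf, hf1, hf2⟩
      · rintro (hx | ⟨f, hf | hf, hf1, hf2⟩)
        · exact Or.inl (Or.inl hx)
        · subst hf; exact Or.inl (Or.inr hf2.symm)
        · exact Or.inr ⟨f, hf, hf1, hf2⟩

lemma deps0_getD (l : List String) (d : PySem.Dict String (PySem.Set String)) (tid : String)
    (hd : ∀ k, d.getD k PySem.Set.empty = PySem.Set.empty) :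
    (List.foldl (fun d t => d.insert t PySem.Set.empty) d l).getD tid PySem.Set.empty = PySem.Set.empty := by
  induction l generalizing d with
  | nil => exact hd tid
  | cons t l ih =>
    exact ih _ (fun k => by rw [PySem.Dict.getD_insert]; split_ifs <;> [rfl; exact hd k])

lemma deps0_contains (l : List String) (tid : String) (h : tid ∈ l) :
    (List.foldl (fun d t => d.insert t PySem.Set.empty) (PySem.Dict.empty : PySem.Dict String (PySem.Set String)) l).contains tid = true := by
  rw [PySem.Dict.contains_iff_mem_keys,
      PySem.Dict.keys_foldl_insert l (fun _ _ => PySem.Set.empty) PySem.Dict.empty]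
  rw [PySem.Dict.keys_empty]
  exact (PySem.Set.mem_update _ _ _).mpr (Or.inr h)

-- ===== VERDICT =====
theorem get_expected_ready_tasks_spec : Claim_equal_get_expected_ready_tasks := by
  intro task_ids edges completed _
  unfold Spec_get_expected_ready_tasks
  show List.foldl
      (fun r tid =>
        if completed.contains tid then r
        else if PySem.Set.issubset
            ((List.foldl depsStep
              (List.foldl (fun d tid => d.insert tid PySem.Set.empty) PySem.Dict.empty task_ids)
              edges).getD tid PySem.Set.empty) completed then PySem.Set.add r tid
        else r) PySem.Set.empty task_ids
    = List.foldl
      (fun r tid =>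
        if !(completed.contains tid) &&
            !(PySem.Set.contains (List.foldl (blockedStep completed) PySem.Set.empty edges) tid)
          then PySem.Set.add r tid else r) PySem.Set.empty task_ids
  apply PySem.List.foldl_congr_mem
  intro r tid htid
  set deps0 := List.foldl (fun d tid => d.insert tid PySem.Set.empty)
      (PySem.Dict.empty : PySem.Dict String (PySem.Set String)) task_ids with hdeps0
  set blocked := List.foldl (blockedStep completed) PySem.Set.empty edges with hblocked
  have hc : (List.foldl depsStep deps0 edges).contains tid = true := by
    rw [depsFold_contains]; exact deps0_contains _ _ htid
  have hmem : ∀ x, x ∈ (List.foldl depsStep deps0 edges).getD tid PySem.Set.empty ↔ (x, tid) ∈ edges := by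
    intro x
    rw [depsFold_mem _ _ _ _ (deps0_contains _ _ htid),
        deps0_getD _ _ _ (fun k => PySem.Dict.getD_empty k PySem.Set.empty)]
    simp [PySem.Set.empty]
  have hbl : tid ∈ blocked ↔ ∃ e ∈ edges, e.1 ∉ completed ∧ e.2 = tid := by
    rw [hblocked, blockedFold_mem]
    simp [PySem.Set.empty]
  have hiff : (PySem.Set.issubset ((List.foldl depsStep deps0 edges).getD tid PySem.Set.empty) completed = true)
      ↔ ¬ (PySem.Set.contains blocked tid = true) := by
    rw [PySem.Set.issubset_iff, PySem.Set.contains_iff, hbl]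
    constructor
    · rintro hall ⟨e, he, h1, h2⟩
      exact h1 (List.contains_iff_mem.mp
        (List.contains_iff_mem.mpr (hall e.1 ((hmem e.1).mpr (by cases e; cases h2; exact he)))))
    · intro hn x hx
      by_contra hxc
      exact hn ⟨(x, tid), (hmem x).mp hx, hxc, rfl⟩
  have hB : PySem.Set.issubset ((List.foldl depsStep deps0 edges).getD tid PySem.Set.empty) completed
      = !(PySem.Set.contains blocked tid) := by
    cases hb : PySem.Set.contains blocked tid
    · simp only [Bool.not_false]
      exact hiff.mpr (fun hm => by rw [hm] at hb; cases hb)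
    · simp only [Bool.not_true]
      rw [Bool.eq_false_iff]
      intro h
      exact hiff.mp h hb
  rw [hB]
  cases hcomp : completed.contains tid <;> simp [hcomp]
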